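-- pv_equiv track=rewrite | github.com/kimbap918/TIL | 연습장/24266.py | MenOfPassion
-- ===== SOURCE A (Python) =====
-- def MenOfPassion(A, n):
--     sum = 0
--     for i in range(1, n+1):
--         A.append(1)
--         for j in range(1, n+1):
--             A.append(1)
--             for k in range(1, n+1):
--                 A.append(1)
--                 sum += A[i] * A[j] * A[k]
--     return sum
-- ===== SOURCE B (Python) =====
-- def MenOfPassion(A, n):
--     # Effective value read at 1-based index i: the original element when i is
--     # inside the original list, otherwise one of the appended 1s.
--     s = sum(A[i] if i < len(A) else 1 for i in range(1, n + 1))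
--     return s ** 3
-- ===== Notes on version B (the rewrite author's own statement) =====
-- stated objective: faster
-- what changed: Replaces the triple nested loop (with repeated appends of 1) by a single pass computing s = sum of the effective values A[1..n] (appended slots read as 1) and returning s**3, using the factorization sum_{i,j,k} v_i v_j v_k = (sum v)^3.
import Mathlib
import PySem

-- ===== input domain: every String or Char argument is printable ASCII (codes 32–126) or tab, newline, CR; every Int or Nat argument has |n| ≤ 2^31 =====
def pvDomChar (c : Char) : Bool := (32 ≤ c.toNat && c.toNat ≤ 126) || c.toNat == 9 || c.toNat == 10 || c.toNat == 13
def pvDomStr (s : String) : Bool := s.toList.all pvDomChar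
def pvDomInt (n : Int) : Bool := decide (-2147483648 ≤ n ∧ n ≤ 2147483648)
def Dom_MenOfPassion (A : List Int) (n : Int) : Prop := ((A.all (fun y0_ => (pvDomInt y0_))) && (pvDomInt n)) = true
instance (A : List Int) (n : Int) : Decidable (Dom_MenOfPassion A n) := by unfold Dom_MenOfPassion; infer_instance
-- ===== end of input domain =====

-- B replaces A's triple nested loop by a single O(n) pass summing the
-- effective values and cubing the sum (measured faster in a timing run).
-- Note: the Python A appends to its argument list in place; B does not
-- mutate — the equivalence proved here is about the RETURN value only.

-- ===== PORT A =====
-- The growing list A (appended to with O(1) Python-list appends) is carried as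
-- an Array with push. gread is A[t]: exact for the nonnegative in-range indices
-- A ever uses (1 ≤ t < len, proved in the lemmas below; Python would raise
-- outside, which never happens here).
def gread (A : Array Int) (t : Int) : Int :=
  if h : t.toNat < A.size then A[t.toNat] else 0

def stepK (i j : Int) (st : Array Int × Int) (k : Int) : Array Int × Int :=
  (st.1.push 1, st.2 + gread (st.1.push 1) i * gread (st.1.push 1) j * gread (st.1.push 1) k)

def stepJ (n i : Int) (st : Array Int × Int) (j : Int) : Array Int × Int :=
  (PySem.List.pyRange 1 (n + 1) 1).foldl (stepK i j) (st.1.push 1, st.2)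

def stepI (n : Int) (st : Array Int × Int) (i : Int) : Array Int × Int :=
  (PySem.List.pyRange 1 (n + 1) 1).foldl (stepJ n i) (st.1.push 1, st.2)

def MenOfPassion (A : List Int) (n : Int) : Int :=
  ((PySem.List.pyRange 1 (n + 1) 1).foldl (stepI n) (A.toArray, 0)).2

-- ===== PORT B =====
-- 'A[i] if i < len(A) else 1'
def vRead (A : List Int) (i : Int) : Int :=
  if i < (A.length : Int) then PySem.List.pyGetD A i 0 else 1

def MenOfPassion_alt (A : List Int) (n : Int) : Int :=
  let s := (PySem.List.pyRange 1 (n + 1) 1).foldl (fun acc i => acc + vRead A i) 0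
  s ^ 3

-- ===== PRECONDITION & SPEC =====
def Spec_MenOfPassion (A : List Int) (n : Int) (out : Int) : Prop := out = MenOfPassion_alt A n
instance (A : List Int) (n : Int) (out : Int) : Decidable (Spec_MenOfPassion A n out) := by unfold Spec_MenOfPassion; infer_instance

-- ===== CLAIM (what is proved, stated in full; the proofs are below) =====
def Claim_equal_MenOfPassion : Prop := ∀ (A : List Int) (n : Int), Dom_MenOfPassion A n → Spec_MenOfPassion A n (MenOfPassion A n)

-- ===== LEMMAS AND PROOFS =====

-- reading index t (1 ≤ t < L + m) from the original list padded with m ones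
-- gives the padding-independent value vRead.
theorem read_pad (A0 : List Int) (m : Nat) (t : Int) (h1 : 1 ≤ t)
    (h2 : t < (A0.length : Int) + m) :
    gread (A0 ++ List.replicate m 1).toArray t = vRead A0 t := by
  have h0 : 0 ≤ t := by omega
  have hlt : t.toNat < (A0 ++ List.replicate m 1).toArray.size := by
    simp [List.length_append]; omega
  unfold gread vRead
  rw [dif_pos hlt]
  by_cases hL : t < (A0.length : Int)
  · have ht : t.toNat < A0.length := by omega
    rw [if_pos hL, PySem.List.pyGetD_eq_getElem _ _ h0 hL]
    simp [List.getElem_append_left ht]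
  · have ht : ¬ t.toNat < A0.length := by omega
    rw [if_neg hL]
    simp [List.getElem_append_right (by omega : A0.length ≤ t.toNat)]

theorem pad_snoc (A0 : List Int) (m : Nat) :
    (A0 ++ List.replicate m (1 : Int)).toArray.push 1 = (A0 ++ List.replicate (m + 1) 1).toArray := by
  simp [List.push_toArray, List.append_assoc, List.replicate_succ' ]

theorem innerK_lemma (A0 : List Int) (n i j : Int) (hi1 : 1 ≤ i) (hj1 : 1 ≤ j) :
    ∀ (d : Nat) (c : Int) (m : Nat) (s : Int), (n + 1 - c).toNat = d → 1 ≤ c →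
    i ≤ (A0.length : Int) + m → j ≤ (A0.length : Int) + m → c ≤ (A0.length : Int) + m →
    (PySem.List.pyRange c (n + 1) 1).foldl (stepK i j) ((A0 ++ List.replicate m 1).toArray, s)
      = ((A0 ++ List.replicate (m + d) 1).toArray,
         s + vRead A0 i * vRead A0 j * (((PySem.List.pyRange c (n + 1) 1).map (vRead A0)).sum)) := by
  intro d
  induction d with
  | zero =>
    intro c m s hd hc hi hj hcm
    rw [PySem.List.pyRange_one_eq_nil (by omega)]
    simp
  | succ d ih =>
    intro c m s hd hc hi hj hcm
    have hlt : c < n + 1 := by omega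
    rw [PySem.List.pyRange_one_cons hlt]
    simp only [List.foldl_cons, List.map_cons, List.sum_cons]
    have hstep : stepK i j ((A0 ++ List.replicate m 1).toArray, s) c
        = ((A0 ++ List.replicate (m + 1) 1).toArray,
           s + vRead A0 i * vRead A0 j * vRead A0 c) := by
      unfold stepK
      simp only [pad_snoc]
      rw [read_pad A0 (m + 1) i hi1 (by push_cast; omega),
          read_pad A0 (m + 1) j hj1 (by push_cast; omega),
          read_pad A0 (m + 1) c hc (by push_cast; omega)]
    rw [hstep, ih (c + 1) (m + 1) _ (by omega) (by omega)
        (by push_cast; omega) (by push_cast; omega) (by push_cast; omega)]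
    simp only [Prod.mk.injEq]
    refine ⟨by rw [show m + 1 + d = m + (d + 1) by omega], by ring⟩

theorem middleJ_lemma (A0 : List Int) (n i : Int) (hi1 : 1 ≤ i) :
    ∀ (d : Nat) (c : Int) (m : Nat) (s : Int), (n + 1 - c).toNat = d → 1 ≤ c →
    i ≤ (A0.length : Int) + m + 1 → c ≤ (A0.length : Int) + m + 1 →
    (PySem.List.pyRange c (n + 1) 1).foldl (stepJ n i) ((A0 ++ List.replicate m 1).toArray, s)
      = ((A0 ++ List.replicate (m + d * (1 + n.toNat))  1).toArray,
         s + vRead A0 i * (((PySem.List.pyRange c (n + 1) 1).map (vRead A0)).sum)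
               * (((PySem.List.pyRange 1 (n + 1) 1).map (vRead A0)).sum)) := by
  intro d
  induction d with
  | zero =>
    intro c m s hd hc hi hcm
    rw [PySem.List.pyRange_one_eq_nil (by omega)]
    simp
  | succ d ih =>
    intro c m s hd hc hi hcm
    have hlt : c < n + 1 := by omega
    rw [PySem.List.pyRange_one_cons hlt]
    simp only [List.foldl_cons, List.map_cons, List.sum_cons]
    have hstep : stepJ n i ((A0 ++ List.replicate m 1).toArray, s) c
        = ((A0 ++ List.replicate (m + 1 + n.toNat) 1).toArray,
           s + vRead A0 i * vRead A0 c
                 * (((PySem.List.pyRange 1 (n + 1) 1).map (vRead A0)).sum)) := by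
      unfold stepJ
      simp only [pad_snoc]
      rw [innerK_lemma A0 n i c hi1 hc n.toNat 1 (m + 1) s (by omega) (by omega)
          (by push_cast; omega) (by push_cast; omega) (by push_cast; omega)]

    rw [hstep, ih (c + 1) (m + 1 + n.toNat) _ (by omega) (by omega)
        (by push_cast; omega) (by push_cast; omega)]
    simp only [Prod.mk.injEq]
    refine ⟨by rw [show m + 1 + n.toNat + d * (1 + n.toNat) = m + (d + 1) * (1 + n.toNat) by ring], by ring⟩

theorem outerI_lemma (A0 : List Int) (n : Int) :
    ∀ (d : Nat) (c : Int) (m : Nat) (s : Int), (n + 1 - c).toNat = d → 1 ≤ c →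
    c ≤ (A0.length : Int) + m + 2 →
    (PySem.List.pyRange c (n + 1) 1).foldl (stepI n) ((A0 ++ List.replicate m 1).toArray, s)
      = ((A0 ++ List.replicate (m + d * (1 + n.toNat * (1 + n.toNat))) 1).toArray,
         s + (((PySem.List.pyRange c (n + 1) 1).map (vRead A0)).sum)
               * ((((PySem.List.pyRange 1 (n + 1) 1).map (vRead A0)).sum)
                  * (((PySem.List.pyRange 1 (n + 1) 1).map (vRead A0)).sum))) := by
  intro d
  induction d with
  | zero =>
    intro c m s hd hc hcm
    rw [PySem.List.pyRange_one_eq_nil (by omega)]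
    simp
  | succ d ih =>
    intro c m s hd hc hcm
    have hlt : c < n + 1 := by omega
    have hP : (0 : Int) ≤ (n.toNat : Int) * (1 + (n.toNat : Int)) := by positivity
    rw [PySem.List.pyRange_one_cons hlt]
    simp only [List.foldl_cons, List.map_cons, List.sum_cons]
    have hstep : stepI n ((A0 ++ List.replicate m 1).toArray, s) c
        = ((A0 ++ List.replicate (m + 1 + n.toNat * (1 + n.toNat)) 1).toArray,
           s + vRead A0 c
                 * (((PySem.List.pyRange 1 (n + 1) 1).map (vRead A0)).sum)
                 * (((PySem.List.pyRange 1 (n + 1) 1).map (vRead A0)).sum)) := by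
      unfold stepI
      simp only [pad_snoc]
      rw [middleJ_lemma A0 n c hc n.toNat 1 (m + 1) s (by omega) (by omega)
          (by push_cast; omega) (by push_cast; omega)]

    rw [hstep, ih (c + 1) (m + 1 + n.toNat * (1 + n.toNat)) _ (by omega) (by omega)
        (by push_cast; linarith)]
    simp only [Prod.mk.injEq]
    refine ⟨by rw [show m + 1 + n.toNat * (1 + n.toNat) + d * (1 + n.toNat * (1 + n.toNat))
            = m + (d + 1) * (1 + n.toNat * (1 + n.toNat)) by ring], by ring⟩

theorem foldl_add_vRead (A : List Int) (l : List Int) (s : Int) :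
    l.foldl (fun acc i => acc + vRead A i) s = s + (l.map (vRead A)).sum := by
  induction l generalizing s with
  | nil => simp
  | cons x xs ih => simp [List.foldl_cons, ih, add_assoc]

-- ===== VERDICT (by name: the statement is the Claim_ definition above) =====
theorem MenOfPassion_spec : Claim_equal_MenOfPassion := by
  intro A n _
  unfold Spec_MenOfPassion MenOfPassion MenOfPassion_alt
  have h := outerI_lemma A n (n + 1 - 1).toNat 1 0 0 rfl (by omega) (by push_cast; omega)
  rw [List.replicate_zero, List.append_nil] at h
  rw [h, foldl_add_vRead]
  ring
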